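-- pv_equiv track=rewrite | github.com/Freitacr/Mechanics-Assistant-Server | Mechanic's Assistant Server/src/Clustering/KeywordClustering.py | __insert_into_array
-- ===== SOURCE A (Python) =====
-- def __insert_into_array(keywords_array, keyword_entry, at_index):
--     holding_var = keyword_entry
--     temp = None
--     for index in range(at_index, len(keywords_array), 1):
--         temp = keywords_array[index]
--         keywords_array[index] = holding_var
--         holding_var = temp
--     return holding_var
-- ===== SOURCE B (Python) =====
-- # B: no per-element carry loop; capture the pushed-off value up front (the entry
-- # itself when at_index >= len, else the current last element), then rebuild the
-- # whole array in one slice assignment. Return value only matches A on 0 <= at_index;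
-- # A's wrapped mutation for negative at_index is not reproduced (see D_).
-- def __insert_into_array(keywords_array, keyword_entry, at_index):
--     n = len(keywords_array)
--     if at_index >= n:
--         return keyword_entry
--     pushed = keywords_array[-1]
--     keywords_array[:] = keywords_array[:at_index] + [keyword_entry] + keywords_array[at_index:n - 1]
--     return pushed
-- ===== Notes on version B (the rewrite author's own statement) =====
-- stated objective: alternative
-- what changed: Instead of walking the suffix with a holding/temp carry swap, B decides the pushed-off value up front (the entry itself when at_index >= len, else the last element), early-returns in the no-shift case, and rebuilds the array in one slice concatenation with no per-element loop.
-- intended difference: For -len(keywords_array) <= at_index < 0 A's forward loop wraps around via Python negative indexing and returns the entry itself (at -1) or the second-to-last element (below -1) while scrambling the array; B returns the element actually pushed off the end (the original last element), which is the intended 'pushed-off element'; D_ holds exactly where those two values differ. — e.g. on __insert_into_array(["a", "b"], "X", -1): A returns "X", B returns "b"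
import Mathlib
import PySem

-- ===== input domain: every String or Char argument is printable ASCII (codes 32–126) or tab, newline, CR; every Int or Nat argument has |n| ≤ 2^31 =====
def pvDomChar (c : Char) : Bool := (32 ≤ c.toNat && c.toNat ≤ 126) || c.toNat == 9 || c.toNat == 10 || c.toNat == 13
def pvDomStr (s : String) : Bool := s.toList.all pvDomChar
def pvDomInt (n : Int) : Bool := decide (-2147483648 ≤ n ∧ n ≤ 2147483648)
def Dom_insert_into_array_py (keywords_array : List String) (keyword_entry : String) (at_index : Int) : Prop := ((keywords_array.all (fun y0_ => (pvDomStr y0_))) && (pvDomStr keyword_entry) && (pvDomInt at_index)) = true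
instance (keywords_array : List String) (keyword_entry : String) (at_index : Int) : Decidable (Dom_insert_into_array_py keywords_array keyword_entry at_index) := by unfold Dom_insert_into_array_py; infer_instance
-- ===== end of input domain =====

-- Equivalence is about the RETURN value only; B decides the pushed-off value up front and
-- rebuilds the array in one slice concatenation (same mutated array as A on 0 ≤ at_index,
-- a different — intended — mutation on negative at_index).

-- ===== PORT A =====
-- A's forward loop: holding_var/temp carry over range(at_index, len, 1), writing each slot.
def insert_into_array_py (keywords_array : List String) (keyword_entry : String) (at_index : Int) : String :=
  ((PySem.List.pyRange at_index (PySem.List.len keywords_array) 1).foldl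
    (fun (st : List String × String) (index : Int) =>
      let temp := PySem.List.pyGetD st.1 index ""
      (PySem.List.pySetD st.1 index st.2, temp))
    (keywords_array, keyword_entry)).2

-- ===== PORT B =====
-- B: n = len; if at_index >= n: return entry; pushed = arr[-1];
--    arr[:] = arr[:at_index] + [entry] + arr[at_index:n-1]; return pushed
def insert_into_array_py_alt (keywords_array : List String) (keyword_entry : String) (at_index : Int) : String :=
  let n := PySem.List.len keywords_array
  if n ≤ at_index then keyword_entry
  else
    let pushed := PySem.List.pyGetD keywords_array (-1) ""
    let _new := PySem.List.slice keywords_array none (some at_index)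
      ++ [keyword_entry] ++ PySem.List.slice keywords_array (some at_index) (some (n - 1))
    pushed

-- ===== PRECONDITION & SPEC =====
-- Pre_ excludes exactly the inputs where A raises IndexError: at_index < -len(keywords_array).
def Pre_insert_into_array_py (keywords_array : List String) (keyword_entry : String) (at_index : Int) : Prop :=
  -(PySem.List.len keywords_array) ≤ at_index
instance (keywords_array : List String) (keyword_entry : String) (at_index : Int) : Decidable (Pre_insert_into_array_py keywords_array keyword_entry at_index) := by unfold Pre_insert_into_array_py; infer_instance
def pvWitness_insert_into_array_py : List String × String × Int := (["alpha", "beta"], "gamma", 0)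

-- For -len ≤ at_index < 0 A's forward loop wraps around via Python negative indexing and
-- returns a wrapped element (the entry itself at -1, the second-to-last element below -1)
-- while scrambling the array; B returns the element actually pushed off the end (the original
-- last element), the intended value. D_ holds exactly where those values differ.
def D_insert_into_array_py (keywords_array : List String) (keyword_entry : String) (at_index : Int) : Prop :=
  -(PySem.List.len keywords_array) ≤ at_index ∧ at_index < 0 ∧
    ((at_index = -1 ∧ keyword_entry ≠ keywords_array.getLast?.getD "") ∨
     (at_index ≤ -2 ∧ keywords_array.getD (keywords_array.length - 2) "" ≠ keywords_array.getLast?.getD ""))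
instance (keywords_array : List String) (keyword_entry : String) (at_index : Int) : Decidable (D_insert_into_array_py keywords_array keyword_entry at_index) := by unfold D_insert_into_array_py; infer_instance

def Spec_insert_into_array_py (keywords_array : List String) (keyword_entry : String) (at_index : Int) (out : String) : Prop := ¬ D_insert_into_array_py keywords_array keyword_entry at_index → out = insert_into_array_py_alt keywords_array keyword_entry at_index
instance (keywords_array : List String) (keyword_entry : String) (at_index : Int) (out : String) : Decidable (Spec_insert_into_array_py keywords_array keyword_entry at_index out) := by unfold Spec_insert_into_array_py; infer_instance

def pvDiffWitness_insert_into_array_py : List String × String × Int := (["a", "b"], "X", -1)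
def pvDiffWitnessOut_insert_into_array_py : String × String := ("X", "b")

-- ===== CLAIM (what is proved, stated in full; the proofs are below) =====
def Claim_unchanged_insert_into_array_py : Prop := ∀ (keywords_array : List String) (keyword_entry : String) (at_index : Int), Dom_insert_into_array_py keywords_array keyword_entry at_index → Pre_insert_into_array_py keywords_array keyword_entry at_index → Spec_insert_into_array_py keywords_array keyword_entry at_index (insert_into_array_py keywords_array keyword_entry at_index)
def Claim_changed_insert_into_array_py : Prop := Dom_insert_into_array_py (pvDiffWitness_insert_into_array_py.1) (pvDiffWitness_insert_into_array_py.2.1) (pvDiffWitness_insert_into_array_py.2.2) ∧ Pre_insert_into_array_py (pvDiffWitness_insert_into_array_py.1) (pvDiffWitness_insert_into_array_py.2.1) (pvDiffWitness_insert_into_array_py.2.2) ∧ D_insert_into_array_py (pvDiffWitness_insert_into_array_py.1) (pvDiffWitness_insert_into_array_py.2.1) (pvDiffWitness_insert_into_array_py.2.2) ∧ insert_into_array_py (pvDiffWitness_insert_into_array_py.1) (pvDiffWitness_insert_into_array_py.2.1) (pvDiffWitness_insert_into_array_py.2.2) = pvDiffWitnessOut_insert_into_array_py.1 ∧ insert_into_array_py_alt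 (pvDiffWitness_insert_into_array_py.1) (pvDiffWitness_insert_into_array_py.2.1) (pvDiffWitness_insert_into_array_py.2.2) = pvDiffWitnessOut_insert_into_array_py.2 ∧ pvDiffWitnessOut_insert_into_array_py.1 ≠ pvDiffWitnessOut_insert_into_array_py.2
def Claim_exact_insert_into_array_py : Prop := ∀ (keywords_array : List String) (keyword_entry : String) (at_index : Int), Dom_insert_into_array_py keywords_array keyword_entry at_index → Pre_insert_into_array_py keywords_array keyword_entry at_index → D_insert_into_array_py keywords_array keyword_entry at_index → insert_into_array_py keywords_array keyword_entry at_index ≠ insert_into_array_py_alt keywords_array keyword_entry at_index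

-- ===== LEMMAS AND PROOFS =====

-- Python's list[i] = v at index -len ≤ -k < 0 sets offset len - k.
lemma pv_setD_neg (xs : List String) (v : String) (k : Nat) (h1 : 1 ≤ k) (h2 : k ≤ xs.length) :
    PySem.List.pySetD xs (-(k:Int)) v = xs.set (xs.length - k) v := by
  have hk1 : -((xs.length:Nat):Int) ≤ -(k:Int) := by omega
  have hk2 : k ≠ 0 := by omega
  simp [PySem.List.pySetD, PySem.List.pySet?, PySem.List.pyIdx?, hk1, hk2]

-- A's carry loop from 0 ≤ a < len ends up returning the last element of the list it started from.
lemma pv_loopA (k : Nat) : ∀ (a : Int) (ys : List String) (h : String),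
    0 ≤ a → a < PySem.List.len ys → ((PySem.List.len ys) - a).toNat = k →
    ((PySem.List.pyRange a (PySem.List.len ys) 1).foldl
      (fun (st : List String × String) (index : Int) =>
        let temp := PySem.List.pyGetD st.1 index ""
        (PySem.List.pySetD st.1 index st.2, temp))
      (ys, h)).2 = ys.getLast?.getD "" := by
  induction k with
  | zero =>
    intro a ys h ha hlt hk
    simp [PySem.List.len_eq] at hlt hk
    omega
  | succ k ih =>
    intro a ys h ha hlt hk
    rw [PySem.List.pyRange_one_cons hlt, List.foldl_cons]
    simp only []
    have hset : PySem.List.pySetD ys a h = ys.set a.toNat h :=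
      PySem.List.pySetD_of_nonneg _ _ ha
    have hlen : PySem.List.len (ys.set a.toNat h) = PySem.List.len ys := by
      simp [PySem.List.len_eq]
    by_cases hend : a + 1 < PySem.List.len ys
    · -- not the last step: recurse on the updated list; its last element is unchanged
      have := ih (a + 1) (ys.set a.toNat h) (PySem.List.pyGetD ys a "") (by omega)
        (by rw [hlen]; exact hend) (by simp [PySem.List.len_eq] at hk ⊢; omega)
      rw [hset, ← hlen] at *
      rw [this]
      -- getLast? unaffected: a.toNat ≠ length - 1
      have hne : a.toNat ≠ ys.length - 1 := by
        simp [PySem.List.len_eq] at hend hlt; omega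
      rw [List.getLast?_eq_getElem?, List.getLast?_eq_getElem?, List.length_set,
        List.getElem?_set_ne hne]
    · -- last step: the tail range is empty and the carried value is ys[len-1]
      have hstop : PySem.List.len ys ≤ a + 1 := by omega
      rw [PySem.List.pyRange_one_eq_nil hstop, List.foldl_nil]
      have hget : PySem.List.pyGetD ys a "" = ys[a.toNat]'(by simp [PySem.List.len_eq] at hlt; omega) :=
        PySem.List.pyGetD_eq_getElem ys "" ha (by simpa [PySem.List.len_eq] using hlt)
      rw [hget, List.getLast?_eq_getElem?]
      have hl : a.toNat = ys.length - 1 := by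
        simp [PySem.List.len_eq] at hlt hstop; omega
      have hne : ys.length - 1 < ys.length := by
        simp [PySem.List.len_eq] at hlt; omega
      simp only [hl, List.getElem?_eq_getElem hne, Option.getD_some]

-- A's carry loop over the NEGATIVE indices -k..-1 shifts the length-k suffix: the list keeps its
-- length and its new last element is the entry (k = 1) or the old second-to-last element (k ≥ 2).
lemma pv_phase1 (k : Nat) : ∀ (a : Int) (ys : List String) (h : String),
    a = -(k:Int) → 1 ≤ k → k ≤ ys.length →
    (((PySem.List.pyRange a 0 1).foldl
      (fun (st : List String × String) (index : Int) =>
        let temp := PySem.List.pyGetD st.1 index ""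
        (PySem.List.pySetD st.1 index st.2, temp)) (ys, h)).1.length = ys.length) ∧
    (((PySem.List.pyRange a 0 1).foldl
      (fun (st : List String × String) (index : Int) =>
        let temp := PySem.List.pyGetD st.1 index ""
        (PySem.List.pySetD st.1 index st.2, temp)) (ys, h)).1.getLast?.getD ""
      = if k = 1 then h else ys.getD (ys.length - 2) "") := by
  induction k with
  | zero => intro a ys h _ hk _; omega
  | succ k ih =>
    intro a ys h ha hk hle
    have hneg : a < 0 := by omega
    rw [PySem.List.pyRange_one_cons hneg, List.foldl_cons]
    simp only []
    have hsub : a = -((k+1:Nat):Int) := by push_cast; omega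
    have hset : PySem.List.pySetD ys a h = ys.set (ys.length - (k+1)) h := by
      rw [hsub]; exact pv_setD_neg ys h (k+1) (by omega) hle
    have hget : PySem.List.pyGetD ys a "" = ys[ys.length - (k+1)]'(by omega) := by
      rw [hsub]; exact PySem.List.pyGetD_neg_natCast ys (k+1) "" (by omega) hle
    by_cases hk1 : k = 0
    · -- last (innermost) negative index: a = -1, tail range empty
      subst hk1
      have h0 : a + 1 = 0 := by omega
      rw [h0, PySem.List.pyRange_one_eq_nil (by omega), List.foldl_nil]
      simp only [hset]
      constructor
      · simp
      · rw [List.getLast?_eq_getElem?, List.length_set]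
        simp [List.getElem?_set_self (by omega : ys.length - 1 < ys.length)]
    · -- a + 1 = -(k : Int), recurse on the updated list
      have htail : a + 1 = -(k:Int) := by omega
      obtain ⟨ihlen, ihlast⟩ := ih (a+1) (ys.set (ys.length - (k+1)) h)
        (PySem.List.pyGetD ys a "") (by simpa using htail) (by omega) (by simp; omega)
      rw [hset]
      refine ⟨by simpa using ihlen, ?_⟩
      rw [ihlast]
      have hkk : ¬ (k + 1 = 1) := by omega
      rw [if_neg hkk]
      by_cases hk2 : k = 1
      · -- the value just read is ys[len-2]
        subst hk2
        rw [if_pos rfl, hget]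
        have hlt2 : ys.length - 2 < ys.length := by omega
        simp [List.getD, List.getElem?_eq_getElem hlt2]
      · -- set position len-(k+1) ≤ len-3 ≠ len-2
        rw [if_neg hk2]
        have hne : ys.length - (k+1) ≠ ys.length - 2 := by omega
        simp [List.getD, List.length_set, List.getElem?_set_ne hne]

-- A's value on a wrapped (negative, in-range) index.
lemma pv_charA_neg (ka : List String) (ke : String) (ai : Int)
    (hneg : ai < 0) (hpre : -(PySem.List.len ka) ≤ ai) :
    insert_into_array_py ka ke ai
      = if ai = -1 then ke else ka.getD (ka.length - 2) "" := by
  have hlen : PySem.List.len ka = (ka.length : Int) := by simp [PySem.List.len_eq]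
  have hk : ai = -(((-ai).toNat : Nat) : Int) := by omega
  unfold insert_into_array_py
  rw [PySem.List.pyRange_one_append ai 0 (PySem.List.len ka) (by omega) (by omega),
    List.foldl_append]
  obtain ⟨h1len, h1last⟩ := pv_phase1 (-ai).toNat ai ka ke hk (by omega) (by omega)
  set st := ((PySem.List.pyRange ai 0 1).foldl
      (fun (st : List String × String) (index : Int) =>
        let temp := PySem.List.pyGetD st.1 index ""
        (PySem.List.pySetD st.1 index st.2, temp)) (ka, ke)) with hst
  have hlen2 : PySem.List.len ka = PySem.List.len st.1 := by
    simp [PySem.List.len_eq, h1len]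
  rw [hlen2, ← Prod.mk.eta (p := st)]
  rw [pv_loopA (PySem.List.len st.1).toNat 0 st.1 st.2 (by omega)
    (by simp [PySem.List.len_eq]; omega) (by omega)]
  rw [h1last]
  by_cases h1 : ai = -1
  · rw [if_pos h1, if_pos (by omega)]
  · rw [if_neg h1, if_neg (by omega)]

-- B returns the last element whenever the insert position is inside the list.
lemma pv_altB_last (ka : List String) (ke : String) (ai : Int)
    (h1 : -(PySem.List.len ka) ≤ ai) (hlt : ai < PySem.List.len ka) :
    insert_into_array_py_alt ka ke ai = ka.getLast?.getD "" := by
  have hlen : PySem.List.len ka = (ka.length : Int) := by simp [PySem.List.len_eq]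
  have hne : ka ≠ [] := by
    intro e; subst e; simp [PySem.List.len_eq] at h1 hlt; omega
  unfold insert_into_array_py_alt
  rw [if_neg (by omega)]
  simp only [PySem.List.pyGetD_neg_one ka "" hne, List.getLast?_eq_some_getLast hne,
    Option.getD_some]

-- ===== VERDICT (by name: the statement is the Claim_ definition above) =====
theorem insert_into_array_py_spec : Claim_unchanged_insert_into_array_py := by
  intro ka ke ai _ hpre hnd
  unfold Pre_insert_into_array_py at hpre
  unfold D_insert_into_array_py at hnd
  by_cases hneg : ai < 0
  · -- wrapped index but the two values coincide (¬ D_)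
    rw [pv_charA_neg ka ke ai hneg hpre,
      pv_altB_last ka ke ai hpre (by simp [PySem.List.len_eq]; omega)]
    by_cases h1 : ai = -1
    · rw [if_pos h1]
      by_contra hne
      exact hnd ⟨hpre, hneg, Or.inl ⟨h1, hne⟩⟩
    · rw [if_neg h1]
      by_contra hne
      exact hnd ⟨hpre, hneg, Or.inr ⟨by omega, hne⟩⟩
  · by_cases hlt : ai < PySem.List.len ka
    · -- 0 ≤ at_index < len: A's loop carries the last element out; B reads it up front
      rw [pv_altB_last ka ke ai hpre hlt]
      unfold insert_into_array_py
      exact pv_loopA ((PySem.List.len ka) - ai).toNat ai ka ke (by omega) hlt rfl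
    · -- at_index ≥ len: A's range is empty, B early-returns the entry
      have hge : PySem.List.len ka ≤ ai := by omega
      unfold insert_into_array_py insert_into_array_py_alt
      rw [PySem.List.pyRange_one_eq_nil hge, List.foldl_nil, if_pos hge]

theorem insert_into_array_py_changed : Claim_changed_insert_into_array_py := by
  unfold Claim_changed_insert_into_array_py; decide

theorem insert_into_array_py_tight : Claim_exact_insert_into_array_py := by
  intro ka ke ai _ hpre hd
  unfold Pre_insert_into_array_py at hpre
  unfold D_insert_into_array_py at hd
  obtain ⟨-, hneg, hcase⟩ := hd
  rw [pv_charA_neg ka ke ai hneg hpre,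
    pv_altB_last ka ke ai hpre (by simp [PySem.List.len_eq]; omega)]
  rcases hcase with ⟨h1, hne⟩ | ⟨h2, hne⟩
  · rw [if_pos h1]; exact hne
  · rw [if_neg (by omega)]; exact hne
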